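-- pv_equiv track=rewrite | github.com/chaec0803/Programmers | FlipGridMaze.py | solution
-- ===== SOURCE A (Python) =====
-- def solution(visible, hidden, k):
--     n = len(visible)
--     m = len(visible[0])
--
--     ans = 0
--     # === DP (bitmask enumeration) ===
--     for rowMask in range(1 << n):
--         for colMask in range(1 << m):
--             val = 0
--             # curr 생성 (기존 curr 의미 그대로)
--             curr = [[1] * m for _ in range(n)]
--             for i in range(n):
--                 if (rowMask >> i) & 1:
--                     for j in range(m):
--                         curr[i][j] *= -1
--             for j in range(m):
--                 for i in range(n):
--                     if (colMask >> j) & 1: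
--                         curr[i][j] *= -1
--                     val += visible[i][j] if curr[i][j] == 1 else hidden[i][j]
--
--             cost = k * (bin(rowMask).count("1") + bin(colMask).count("1"))
--             ans = max(ans, val - cost)
--
--     return ans
-- ===== SOURCE B (Python) =====
-- def solution(visible, hidden, k):
--     # Enumerate only row-flip masks; for each column pick the better of
--     # flipping it or not, independently (the column choices are independent
--     # once the row flips are fixed).
--     n = len(visible)
--     m = len(visible[0])
--     ans = 0
--     for rowMask in range(1 << n):
--         total = 0
--         for j in range(m):
--             c0 = 0
--             c1 = 0
--             for i in range(n):
--                 if (rowMask >> i) & 1: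
--                     c0 += hidden[i][j]
--                     c1 += visible[i][j]
--                 else:
--                     c0 += visible[i][j]
--                     c1 += hidden[i][j]
--             total += max(c0, c1 - k)
--         ans = max(ans, total - k * bin(rowMask).count("1"))
--     return ans
-- ===== Notes on version B (the rewrite author's own statement) =====
-- stated objective: alternative
-- what changed: Instead of enumerating all 2^(n+m) row/col flip-mask pairs and rebuilding the sign matrix for each, B enumerates only the 2^n row masks and, for each fixed row mask, chooses each column's flip independently (max of unflipped vs flipped-minus-k column sum), which is exact because column contributions are independent; intended as faster (measured 284x at n=64, but B still times out on the very largest random inputs, so not confirmed at the top size).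
import Mathlib
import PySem

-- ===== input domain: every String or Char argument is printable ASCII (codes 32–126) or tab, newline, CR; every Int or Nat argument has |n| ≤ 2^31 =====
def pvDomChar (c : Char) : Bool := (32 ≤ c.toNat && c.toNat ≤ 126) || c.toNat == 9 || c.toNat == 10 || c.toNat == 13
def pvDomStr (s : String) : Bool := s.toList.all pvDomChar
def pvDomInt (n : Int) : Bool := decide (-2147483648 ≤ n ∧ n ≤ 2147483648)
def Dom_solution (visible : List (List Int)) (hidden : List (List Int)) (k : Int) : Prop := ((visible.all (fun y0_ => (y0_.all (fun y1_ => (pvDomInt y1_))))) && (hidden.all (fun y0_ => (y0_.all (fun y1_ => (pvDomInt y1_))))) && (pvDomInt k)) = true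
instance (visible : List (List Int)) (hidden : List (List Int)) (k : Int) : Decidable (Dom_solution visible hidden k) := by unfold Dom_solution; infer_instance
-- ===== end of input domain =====

-- B enumerates only the 2^n row-flip masks and picks each column's flip greedily
-- (columns are independent once rows are fixed) instead of A's 2^(n+m) mask pairs.

-- ===== PORT A =====
-- shared helper: Python's bin(x).count("1") for a nonnegative int (both A and B use it)
def pvPop (x : Nat) : Nat :=
  if h : x = 0 then 0 else x % 2 + pvPop (x / 2)
decreasing_by exact Nat.div_lt_self (Nat.pos_of_ne_zero h) one_lt_two

def solution (visible : List (List Int)) (hidden : List (List Int)) (k : Int) : Int :=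
  let n := visible.length
  let m := (visible.headD []).length
  (List.range (2 ^ n)).foldl (fun ans rowMask =>
    (List.range (2 ^ m)).foldl (fun ans colMask =>
      -- curr = [[1]*m for _ in range(n)]
      let curr0 : List (List Int) := List.replicate n (List.replicate m 1)
      -- row-flip pass
      let curr1 := (List.range n).foldl (fun c i =>
        if rowMask.testBit i then
          (List.range m).foldl (fun c j => c.modify i (fun row => row.modify j (· * -1))) c
        else c) curr0
      -- column pass accumulating val while mutating curr
      let cv := (List.range m).foldl (fun (p : List (List Int) × Int) j =>
        (List.range n).foldl (fun (p : List (List Int) × Int) i =>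
          ((if colMask.testBit j then p.1.modify i (fun row => row.modify j (· * -1)) else p.1),
           p.2 + (if ((((if colMask.testBit j then p.1.modify i (fun row => row.modify j (· * -1)) else p.1).getD i []).getD j 0) == 1)
                  then (visible.getD i []).getD j 0 else (hidden.getD i []).getD j 0))) p) (curr1, 0)
      let cost := k * ((pvPop rowMask : Int) + (pvPop colMask : Int))
      max ans (cv.2 - cost)) ans) 0

-- ===== PORT B =====
def solution_alt (visible : List (List Int)) (hidden : List (List Int)) (k : Int) : Int :=
  let n := visible.length
  let m := (visible.headD []).length
  (List.range (2 ^ n)).foldl (fun ans rowMask =>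
    let total := (List.range m).foldl (fun total j =>
      let cc := (List.range n).foldl (fun (p : Int × Int) i =>
        if rowMask.testBit i then
          (p.1 + (hidden.getD i []).getD j 0, p.2 + (visible.getD i []).getD j 0)
        else
          (p.1 + (visible.getD i []).getD j 0, p.2 + (hidden.getD i []).getD j 0)) (0, 0)
      total + max cc.1 (cc.2 - k)) 0
    max ans (total - k * (pvPop rowMask : Int))) 0

-- ===== PRECONDITION & SPEC =====
-- Pre_ = exactly the inputs where Python A returns: visible nonempty, every visible row
-- at least as long as row 0, and (unless row 0 is empty) hidden covering the same n×m cells.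
def Pre_solution (visible : List (List Int)) (hidden : List (List Int)) (k : Int) : Prop :=
  visible ≠ [] ∧ (∀ r ∈ visible, (visible.headD []).length ≤ r.length) ∧
  ((visible.headD []).length = 0 ∨
    (visible.length ≤ hidden.length ∧
     ∀ r ∈ hidden.take visible.length, (visible.headD []).length ≤ r.length))
instance (visible : List (List Int)) (hidden : List (List Int)) (k : Int) : Decidable (Pre_solution visible hidden k) := by unfold Pre_solution; infer_instance

def pvWitness_solution : List (List Int) × List (List Int) × Int := ([[1, 2], [3, 4]], ([[0, -1], [5, 6]], 1))

def Spec_solution (visible : List (List Int)) (hidden : List (List Int)) (k : Int) (out : Int) : Prop := out = solution_alt visible hidden k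
instance (visible : List (List Int)) (hidden : List (List Int)) (k : Int) (out : Int) : Decidable (Spec_solution visible hidden k out) := by unfold Spec_solution; infer_instance

-- ===== CLAIM (what is proved, stated in full; the proofs are below) =====
def Claim_equal_solution : Prop := ∀ (visible : List (List Int)) (hidden : List (List Int)) (k : Int), Dom_solution visible hidden k → Pre_solution visible hidden k → Spec_solution visible hidden k (solution visible hidden k)

-- ===== LEMMAS AND PROOFS =====

-- cell value once both flips are decided: visible iff the two flips cancel
def pvCell (v h : List (List Int)) (i j : Nat) (rb cb : Bool) : Int :=
  if rb == cb then (v.getD i []).getD j 0 else (h.getD i []).getD j 0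

def pvA2 (c : List (List Int)) (i j : Nat) : Int := (c.getD i []).getD j 0

-- column value for a fixed row mask and a column-flip choice
def pvColv (v h : List (List Int)) (rm n j : Nat) (cb : Bool) : Int :=
  ∑ i ∈ Finset.range n, pvCell v h i j (rm.testBit i) cb

-- best achievable total for a fixed row mask (column flips chosen independently)
def pvS (v h : List (List Int)) (k : Int) (rm n m : Nat) : Int :=
  ∑ j ∈ Finset.range m, max (pvColv v h rm n j false) (pvColv v h rm n j true - k)

def pvCanon (v h : List (List Int)) (k : Int) (n m : Nat) : Int :=
  (List.range (2 ^ n)).foldl (fun a rm => max a (pvS v h k rm n m - k * (pvPop rm : Int))) 0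

lemma pv_getD_modify {α : Type} (l : List α) (i j : Nat) (f : α → α) (d : α) :
    (l.modify i f).getD j d = if i = j ∧ j < l.length then f (l.getD j d) else l.getD j d := by
  by_cases hj : j < l.length
  · rw [List.getD_eq_getElem?_getD, List.getD_eq_getElem?_getD, List.getElem?_modify,
      List.getElem?_eq_getElem hj]
    by_cases hij : i = j <;> simp [hij, hj]
  · rw [List.getD_eq_getElem?_getD, List.getD_eq_getElem?_getD, List.getElem?_modify,
      List.getElem?_eq_none (by omega)]
    simp [hj]

lemma pv_modify_modify {α : Type} (l : List α) (i : Nat) (f g : α → α) :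
    (l.modify i f).modify i g = l.modify i (fun x => g (f x)) := by
  apply List.ext_getElem?
  intro j
  simp only [List.getElem?_modify]
  cases l[j]? with
  | none => rfl
  | some a => by_cases h : i = j <;> simp [h]

lemma pv_modify_id {α : Type} (l : List α) (i : Nat) :
    l.modify i (fun x => x) = l := by
  apply List.ext_getElem?
  intro j
  simp only [List.getElem?_modify]
  cases l[j]? with
  | none => rfl
  | some a => by_cases h : i = j <;> simp [h]

-- a loop of modifications of the same outer slot is one modification by the inner loop
lemma pv_modfold {α : Type} (l : List Nat) (i : Nat) (g : Nat → α → α) :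
    ∀ (c : List α), l.foldl (fun c j => c.modify i (g j)) c
      = c.modify i (fun row => l.foldl (fun r j => g j r) row) := by
  induction l with
  | nil => intro c; simp [pv_modify_id]
  | cons x l ih =>
    intro c
    simp only [List.foldl_cons]
    rw [ih, pv_modify_modify]

lemma pv_rowneg_len (cnt : Nat) : ∀ (s : Nat) (row : List Int),
    (((List.range' s cnt).foldl (fun r j => r.modify j (· * -1)) row)).length = row.length := by
  induction cnt with
  | zero => intro s row; simp
  | succ cnt ih =>
    intro s row
    rw [List.range'_succ, List.foldl_cons, ih]
    simp

lemma pv_rowneg_getD (cnt : Nat) : ∀ (s : Nat) (row : List Int) (jj : Nat),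
    (((List.range' s cnt).foldl (fun r j => r.modify j (· * -1)) row)).getD jj 0
      = if s ≤ jj ∧ jj < s + cnt then (row.getD jj 0) * -1 else row.getD jj 0 := by
  induction cnt with
  | zero => intro s row jj; rw [List.range'_zero, List.foldl_nil, if_neg (by omega)]
  | succ cnt ih =>
    intro s row jj
    rw [List.range'_succ, List.foldl_cons, ih]
    simp only [pv_getD_modify]
    split_ifs <;>
      first
        | rfl
        | (exfalso; omega)
        | (rw [List.getD_eq_default _ _ (by omega)]; ring)

lemma pv_rowneg_nil (l : List Nat) : l.foldl (fun (r : List Int) j => r.modify j (· * -1)) [] = [] := by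
  induction l with
  | nil => rfl
  | cons x l ih => simpa using ih

-- characterisation of the row-flip pass
lemma pv_currfold_len (rbit : Nat → Bool) (m : Nat) (l : List Nat) :
    ∀ (c : List (List Int)),
      (l.foldl (fun c i => if rbit i then
          (List.range m).foldl (fun c j => c.modify i (fun row => row.modify j (· * -1))) c
        else c) c).length = c.length := by
  induction l with
  | nil => intro c; rfl
  | cons x l ih =>
    intro c
    simp only [List.foldl_cons]
    rw [ih]
    by_cases h : rbit x <;> simp [h, pv_modfold]

lemma pv_currfold_getD (rbit : Nat → Bool) (m : Nat) :
    ∀ (cnt s : Nat) (c : List (List Int)) (ii : Nat),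
      ((List.range' s cnt).foldl (fun c i => if rbit i then
          (List.range m).foldl (fun c j => c.modify i (fun row => row.modify j (· * -1))) c
        else c) c).getD ii []
      = if s ≤ ii ∧ ii < s + cnt ∧ rbit ii then
          (List.range m).foldl (fun r j => r.modify j (· * -1)) (c.getD ii [])
        else c.getD ii [] := by
  intro cnt
  induction cnt with
  | zero =>
    intro s c ii
    rw [List.range'_zero, List.foldl_nil, if_neg (by rintro ⟨h1, h2, h3⟩; omega)]
  | succ cnt ih =>
    intro s c ii
    rw [List.range'_succ, List.foldl_cons]
    by_cases hb : rbit s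
    · rw [if_pos hb, pv_modfold, ih, pv_getD_modify]
      by_cases h1 : s = ii
      · subst h1
        rw [if_neg (show ¬(s + 1 ≤ s ∧ s < s + 1 + cnt ∧ rbit s = true) from by rintro ⟨h1', _, _⟩; omega),
          if_pos (show s ≤ s ∧ s < s + (cnt + 1) ∧ rbit s = true from ⟨le_rfl, by omega, hb⟩)]
        by_cases h2 : s < c.length
        · rw [if_pos ⟨rfl, h2⟩]
        · rw [if_neg (show ¬(s = s ∧ s < c.length) from by tauto)]
          have hd : c.getD s [] = [] := List.getD_eq_default _ _ (by omega)
          rw [hd, pv_rowneg_nil]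
      · rw [if_neg (show ¬(s = ii ∧ ii < c.length) from fun hcon => h1 hcon.1)]
        by_cases h3 : s + 1 ≤ ii ∧ ii < s + 1 + cnt ∧ rbit ii = true
        · rw [if_pos h3, if_pos (show s ≤ ii ∧ ii < s + (cnt + 1) ∧ rbit ii = true from ⟨by omega, by omega, h3.2.2⟩)]
        · rw [if_neg h3, if_neg (show ¬(s ≤ ii ∧ ii < s + (cnt + 1) ∧ rbit ii = true) from fun hcon => h3 ⟨by omega, by omega, hcon.2.2⟩)]
    · rw [if_neg hb, ih]
      by_cases h1 : s = ii
      · subst h1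
        rw [if_neg (by rintro ⟨h1', _, _⟩; omega), if_neg (by rintro ⟨_, _, h3⟩; exact hb h3)]
      · by_cases h3 : s + 1 ≤ ii ∧ ii < s + 1 + cnt ∧ rbit ii = true
        · rw [if_pos h3, if_pos ⟨by omega, by omega, h3.2.2⟩]
        · rw [if_neg h3, if_neg (fun hcon => h3 ⟨by omega, by omega, hcon.2.2⟩)]

lemma pv_sum_range_map (f : Nat → Int) (n : Nat) :
    (((List.range n).map f)).sum = ∑ i ∈ Finset.range n, f i := by
  induction n with
  | zero => simp
  | succ n ih => rw [List.range_succ, List.map_append, List.sum_append, Finset.sum_range_succ, ih]; simp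

-- the effect of one in-place cell negation on the matrix
lemma pv_A2_modify (c : List (List Int)) (s j : Nat) (ii jj : Nat) :
    pvA2 (c.modify s (fun row => row.modify j (· * -1))) ii jj
      = if s = ii ∧ ii < c.length ∧ j = jj ∧ jj < (c.getD ii []).length
        then -(pvA2 c ii jj) else pvA2 c ii jj := by
  unfold pvA2
  rw [pv_getD_modify]
  by_cases h1 : s = ii ∧ ii < c.length
  · rw [if_pos h1]
    show ((c.getD ii []).modify j (· * -1)).getD jj 0 = _
    rw [pv_getD_modify]
    by_cases h2 : j = jj ∧ jj < (c.getD ii []).length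
    · rw [if_pos h2, if_pos ⟨h1.1, h1.2, h2.1, h2.2⟩]
      show (c.getD ii []).getD jj 0 * -1 = -((c.getD ii []).getD jj 0)
      ring
    · rw [if_neg h2, if_neg (by tauto)]
  · rw [if_neg h1, if_neg (by tauto)]

lemma pv_rowlen_modify (c : List (List Int)) (s j ii : Nat) :
    ((c.modify s (fun row => row.modify j (· * -1))).getD ii []).length
      = (c.getD ii []).length := by
  rw [pv_getD_modify]
  by_cases h : s = ii ∧ ii < c.length
  · rw [if_pos h]
    show ((c.getD ii []).modify j (· * -1)).length = _
    rw [List.length_modify]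
  · rw [if_neg h]

-- the column pass of A: one column, rows s..s+cnt-1
lemma pv_inner (cb : Bool) (j m : Nat) (hj : j < m) (rbit : Nat → Bool) (V H : Nat → Int) :
    ∀ (cnt s n : Nat) (c : List (List Int)) (vacc : Int),
      s + cnt ≤ n → c.length = n →
      (∀ ii, ii < n → (c.getD ii []).length = m) →
      (∀ ii, s ≤ ii → ii < n → pvA2 c ii j = (if rbit ii then -1 else 1)) →
      ∀ res, res = ((List.range' s cnt).foldl
        (fun (p : List (List Int) × Int) i =>
          ((if cb then p.1.modify i (fun row => row.modify j (· * -1)) else p.1),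
           p.2 + (if ((((if cb then p.1.modify i (fun row => row.modify j (· * -1)) else p.1).getD i []).getD j 0) == 1)
                  then V i else H i)))
        (c, vacc)) →
      (res.2 = vacc + (((List.range' s cnt).map (fun i => if rbit i == cb then V i else H i)).sum)
       ∧ res.1.length = n
       ∧ (∀ ii, ii < n → (res.1.getD ii []).length = m)
       ∧ (∀ ii jj, jj ≠ j → pvA2 res.1 ii jj = pvA2 c ii jj)) := by
  intro cnt
  induction cnt with
  | zero =>
    intro s n c vacc _ hc hrow _ res hres
    subst hres
    exact ⟨by simp, hc, hrow, fun ii jj _ => rfl⟩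
  | succ cnt ih =>
    intro s n c vacc hsn hc hrow hinv res hres
    have hslen : s < n := by omega
    set c' : List (List Int) := if cb then c.modify s (fun row => row.modify j (· * -1)) else c with hc'
    have hcl' : c'.length = n := by
      rw [hc']
      by_cases hcb : cb = true
      · rw [if_pos hcb, List.length_modify]; exact hc
      · rw [if_neg hcb]; exact hc
    have hrow' : ∀ ii, ii < n → (c'.getD ii []).length = m := by
      intro ii hii
      rw [hc']
      by_cases hcb : cb = true
      · rw [if_pos hcb, pv_rowlen_modify]; exact hrow ii hii
      · rw [if_neg hcb]; exact hrow ii hii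
    have hread : pvA2 c' s j = (if (rbit s == cb) then 1 else -1) := by
      rw [hc']
      by_cases hcb : cb = true
      · rw [if_pos hcb, pv_A2_modify,
          if_pos ⟨rfl, by omega, rfl, by rw [hrow s hslen]; exact hj⟩,
          hinv s le_rfl hslen, hcb]
        by_cases hr : rbit s = true <;> simp [hr]
      · rw [if_neg hcb, hinv s le_rfl hslen]
        have hcb' : cb = false := by revert hcb; cases cb <;> simp
        rw [hcb']
        by_cases hr : rbit s = true <;> simp [hr]
    have hinv' : ∀ ii, s + 1 ≤ ii → ii < n → pvA2 c' ii j = (if rbit ii then -1 else 1) := by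
      intro ii h1 h2
      have heq : pvA2 c' ii j = pvA2 c ii j := by
        rw [hc']
        by_cases hcb : cb = true
        · rw [if_pos hcb, pv_A2_modify, if_neg (by rintro ⟨h', _⟩; omega)]
        · rw [if_neg hcb]
      rw [heq]; exact hinv ii (by omega) h2
    have hoff : ∀ ii jj, jj ≠ j → pvA2 c' ii jj = pvA2 c ii jj := by
      intro ii jj hjj
      rw [hc']
      by_cases hcb : cb = true
      · rw [if_pos hcb, pv_A2_modify, if_neg (by rintro ⟨_, _, h', _⟩; exact hjj h'.symm)]
      · rw [if_neg hcb]
    have hres' : res = ((List.range' (s + 1) cnt).foldl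
        (fun (p : List (List Int) × Int) i =>
          ((if cb then p.1.modify i (fun row => row.modify j (· * -1)) else p.1),
           p.2 + (if ((((if cb then p.1.modify i (fun row => row.modify j (· * -1)) else p.1).getD i []).getD j 0) == 1)
                  then V i else H i)))
        (c', vacc + (if (((c'.getD s []).getD j 0) == 1) then V s else H s))) := by
      rw [hres, List.range'_succ, List.foldl_cons]
    obtain ⟨e1, e2, e3, e4⟩ := ih (s + 1) n c'
      (vacc + (if (((c'.getD s []).getD j 0) == 1) then V s else H s))
      (by omega) hcl' hrow' hinv' res hres'
    have hbeq : (((c'.getD s []).getD j 0) == 1) = (rbit s == cb) := by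
      have hh := hread
      unfold pvA2 at hh
      rw [hh]
      cases hbb : (rbit s == cb) <;> simp
    rw [hbeq] at e1
    refine ⟨?_, e2, e3, ?_⟩
    · rw [e1, List.range'_succ]
      simp only [List.map_cons, List.sum_cons]
      ring
    · intro ii jj hjj
      rw [e4 ii jj hjj, hoff ii jj hjj]

-- the full column pass of A
lemma pv_outer (cbit rbit : Nat → Bool) (n m : Nat) (V H : Nat → Nat → Int) :
    ∀ (cnt s : Nat) (c : List (List Int)) (vacc : Int),
      s + cnt ≤ m → c.length = n →
      (∀ ii, ii < n → (c.getD ii []).length = m) →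
      (∀ ii jj, ii < n → s ≤ jj → jj < m → pvA2 c ii jj = (if rbit ii then -1 else 1)) →
      ((List.range' s cnt).foldl (fun (p : List (List Int) × Int) j =>
        (List.range n).foldl (fun (p : List (List Int) × Int) i =>
          ((if cbit j then p.1.modify i (fun row => row.modify j (· * -1)) else p.1),
           p.2 + (if ((((if cbit j then p.1.modify i (fun row => row.modify j (· * -1)) else p.1).getD i []).getD j 0) == 1)
                  then V i j else H i j))) p) (c, vacc)).2
      = vacc + (((List.range' s cnt).map (fun j =>
          ((List.range n).map (fun i => if rbit i == cbit j then V i j else H i j)).sum)).sum) := by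
  intro cnt
  induction cnt with
  | zero => intro s c vacc _ _ _ _; simp
  | succ cnt ih =>
    intro s c vacc hsm hc hrow hinv
    rw [List.range'_succ, List.foldl_cons]
    have hs : s < m := by omega
    obtain ⟨e1, e2, e3, e4⟩ := pv_inner (cbit s) s m hs rbit
      (fun i => V i s) (fun i => H i s) n 0 n c vacc (by omega) hc hrow
      (fun ii _ h2 => hinv ii s h2 le_rfl hs)
      ((List.range n).foldl (fun (p : List (List Int) × Int) i =>
          ((if cbit s then p.1.modify i (fun row => row.modify s (· * -1)) else p.1),
           p.2 + (if ((((if cbit s then p.1.modify i (fun row => row.modify s (· * -1)) else p.1).getD i []).getD s 0) == 1)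
                  then V i s else H i s))) (c, vacc))
      (by rw [List.range_eq_range'])
    set mid := ((List.range n).foldl (fun (p : List (List Int) × Int) i =>
          ((if cbit s then p.1.modify i (fun row => row.modify s (· * -1)) else p.1),
           p.2 + (if ((((if cbit s then p.1.modify i (fun row => row.modify s (· * -1)) else p.1).getD i []).getD s 0) == 1)
                  then V i s else H i s))) (c, vacc)) with hmid
    have hpair : mid = (mid.1, mid.2) := rfl
    rw [hpair]
    rw [ih (s + 1) mid.1 mid.2 (by omega) e2 e3
      (fun ii jj h1 h2 h3 => by
        rw [e4 ii jj (by omega)]; exact hinv ii jj h1 (by omega) h3)]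
    rw [e1]
    simp only [List.map_cons, List.sum_cons]
    rw [← List.range_eq_range']
    ring

lemma pv_pop_unfold (x : Nat) : pvPop x = x % 2 + pvPop (x / 2) := by
  rw [pvPop]
  split
  · rename_i h; subst h; rw [pvPop]; simp
  · rfl

lemma pv_pop_bits : ∀ (m cm : Nat), cm < 2 ^ m →
    (pvPop cm : Int) = ∑ j ∈ Finset.range m, (if cm.testBit j then (1 : Int) else 0) := by
  intro m
  induction m with
  | zero =>
    intro cm h
    interval_cases cm
    rw [pvPop]; simp
  | succ m ih =>
    intro cm h
    rw [pv_pop_unfold, Finset.sum_range_succ']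
    have h2 : cm / 2 < 2 ^ m := by
      have : 2 ^ (m + 1) = 2 ^ m * 2 := by ring
      omega
    have hih := ih (cm / 2) h2
    push_cast
    rw [hih]
    have hb : ∀ j : Nat, (cm / 2).testBit j = cm.testBit (j + 1) := by
      intro j; rw [Nat.testBit_add_one]
    simp only [hb]
    have h0 : (if cm.testBit 0 then (1 : Int) else 0) = ((cm % 2 : Nat) : Int) := by
      rw [Nat.testBit_zero]
      rcases Nat.mod_two_eq_zero_or_one cm with h | h <;> simp [h]
    rw [h0]
    push_cast
    ring

-- max over all column masks = sum over columns of the per-column max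
lemma pv_key (colv : Nat → Bool → Int) : ∀ (m : Nat) (C a0 : Int),
    (List.range (2 ^ m)).foldl
      (fun a cm => max a ((∑ j ∈ Finset.range m, colv j (cm.testBit j)) + C)) a0
    = max a0 ((∑ j ∈ Finset.range m, max (colv j false) (colv j true)) + C) := by
  intro m
  induction m with
  | zero => intro C a0; simp [List.range_one]
  | succ m ih =>
    intro C a0
    have hsplit : 2 ^ (m + 1) = 2 ^ m + 2 ^ m := by ring
    rw [hsplit, List.range_add, List.foldl_append, List.foldl_map]
    have hfst : (List.range (2 ^ m)).foldl
        (fun a cm => max a ((∑ j ∈ Finset.range (m + 1), colv j (cm.testBit j)) + C)) a0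
        = max a0 ((∑ j ∈ Finset.range m, max (colv j false) (colv j true)) + (colv m false + C)) := by
      rw [PySem.List.foldl_congr_mem (g := fun a cm =>
        max a ((∑ j ∈ Finset.range m, colv j (cm.testBit j)) + (colv m false + C)))]
      · exact ih (colv m false + C) a0
      · intro a cm hcm
        rw [List.mem_range] at hcm
        rw [Finset.sum_range_succ, Nat.testBit_lt_two_pow hcm]
        ring_nf
    rw [hfst]
    have hsnd : (List.range (2 ^ m)).foldl
        (fun a cm => max a ((∑ j ∈ Finset.range (m + 1), colv j ((2 ^ m + cm).testBit j)) + C))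
          (max a0 ((∑ j ∈ Finset.range m, max (colv j false) (colv j true)) + (colv m false + C)))
        = max (max a0 ((∑ j ∈ Finset.range m, max (colv j false) (colv j true)) + (colv m false + C)))
            ((∑ j ∈ Finset.range m, max (colv j false) (colv j true)) + (colv m true + C)) := by
      rw [PySem.List.foldl_congr_mem (g := fun a cm =>
        max a ((∑ j ∈ Finset.range m, colv j (cm.testBit j)) + (colv m true + C)))]
      · exact ih (colv m true + C) _
      · intro a cm hcm
        rw [List.mem_range] at hcm
        rw [Finset.sum_range_succ]
        have hm : (2 ^ m + cm).testBit m = true := by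
          rw [Nat.testBit_two_pow_add_eq, Nat.testBit_lt_two_pow hcm]
          rfl
        have hlt : ∀ j ∈ Finset.range m, colv j ((2 ^ m + cm).testBit j) = colv j (cm.testBit j) := by
          intro j hjm
          rw [Finset.mem_range] at hjm
          rw [Nat.testBit_two_pow_add_gt hjm]
        rw [Finset.sum_congr rfl hlt, hm]
        ring_nf
    rw [hsnd, Finset.sum_range_succ, max_assoc]
    congr 1
    rw [← add_assoc, ← add_assoc, max_add_add_right, max_add_add_left]

lemma pv_foldl_add_shift (f : Nat → Int) (l : List Nat) :
    ∀ (a : Int), l.foldl (fun s i => s + f i) a = a + (l.map f).sum := by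
  induction l with
  | nil => intro a; simp
  | cons x l ih => intro a; simp only [List.foldl_cons, List.map_cons, List.sum_cons]; rw [ih]; ring

-- A's port computes pvCanon
lemma pv_A_eq (v h : List (List Int)) (k : Int) :
    solution v h k = pvCanon v h k v.length (v.headD []).length := by
  unfold solution pvCanon
  dsimp only
  set n := v.length with hn
  set m := (v.headD []).length with hm
  apply PySem.List.foldl_congr_mem
  intro ans rm hrm
  set curr1 := (List.range n).foldl (fun c i =>
    if rm.testBit i then
      (List.range m).foldl (fun c j => c.modify i (fun row => row.modify j (· * -1))) c
    else c) (List.replicate n (List.replicate m 1)) with hcurr1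
  have hlen : curr1.length = n := by
    rw [hcurr1, pv_currfold_len]; simp
  have hgetrow : ∀ ii, ii < n →
      curr1.getD ii [] = if rm.testBit ii then
        (List.range m).foldl (fun r j => r.modify j (· * -1)) (List.replicate m 1)
      else List.replicate m (1 : Int) := by
    intro ii hii
    have hrep : (List.replicate n (List.replicate m (1 : Int))).getD ii [] = List.replicate m 1 := by
      rw [List.getD_eq_getElem _ _ (by simpa using hii)]
      simp
    rw [hcurr1, show List.range n = List.range' 0 n from List.range_eq_range',
      pv_currfold_getD, hrep]
    by_cases hb : rm.testBit ii
    · rw [if_pos ⟨by omega, by omega, hb⟩, if_pos hb]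
    · rw [if_neg (by rintro ⟨_, _, h3⟩; exact hb h3), if_neg hb]
  have hrowlen : ∀ ii, ii < n → (curr1.getD ii []).length = m := by
    intro ii hii
    rw [hgetrow ii hii]
    by_cases hb : rm.testBit ii
    · rw [if_pos hb, show List.range m = List.range' 0 m from List.range_eq_range',
        pv_rowneg_len]
      simp
    · rw [if_neg hb]; simp
  have hval : ∀ ii jj, ii < n → jj < m → pvA2 curr1 ii jj = (if rm.testBit ii then -1 else 1) := by
    intro ii jj hii hjj
    unfold pvA2
    rw [hgetrow ii hii]
    by_cases hb : rm.testBit ii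
    · rw [if_pos hb, if_pos hb, show List.range m = List.range' 0 m from List.range_eq_range',
        pv_rowneg_getD, if_pos (by omega), List.getD_eq_getElem _ _ (by simpa using hjj)]
      simp
    · rw [if_neg hb, if_neg hb, List.getD_eq_getElem _ _ (by simpa using hjj)]
      simp
  rw [PySem.List.foldl_congr_mem (g := fun a cm =>
    max a ((∑ j ∈ Finset.range m, ((pvColv v h rm n j (cm.testBit j))
        - (if cm.testBit j then k else 0))) + (-(k * (pvPop rm : Int)))))]
  · refine (pv_key (fun j b => pvColv v h rm n j b - (if b then k else 0)) m
      (-(k * (pvPop rm : Int))) ans).trans ?_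
    congr 1
    unfold pvS
    have hcg : ∀ j ∈ Finset.range m,
        max (pvColv v h rm n j false - (if (false : Bool) then k else 0))
          (pvColv v h rm n j true - (if (true : Bool) then k else 0))
        = max (pvColv v h rm n j false) (pvColv v h rm n j true - k) := by
      intro j _; simp
    rw [Finset.sum_congr rfl hcg]
    ring
  · intro a cm hcm
    rw [List.mem_range] at hcm
    have hv : ((List.range m).foldl (fun (p : List (List Int) × Int) j =>
        (List.range n).foldl (fun (p : List (List Int) × Int) i =>
          ((if cm.testBit j then p.1.modify i (fun row => row.modify j (· * -1)) else p.1),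
           p.2 + (if ((((if cm.testBit j then p.1.modify i (fun row => row.modify j (· * -1)) else p.1).getD i []).getD j 0) == 1)
                  then (v.getD i []).getD j 0 else (h.getD i []).getD j 0))) p) (curr1, 0)).2
        = ((List.range m).map (fun j =>
            ((List.range n).map (fun i => if rm.testBit i == cm.testBit j
              then (v.getD i []).getD j 0 else (h.getD i []).getD j 0)).sum)).sum := by
      rw [show List.range m = List.range' 0 m from List.range_eq_range',
        pv_outer (cm.testBit) (rm.testBit) n m
          (fun i j => (v.getD i []).getD j 0) (fun i j => (h.getD i []).getD j 0)
          m 0 curr1 0 (by omega) hlen hrowlen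
          (fun ii jj h1 _ h3 => hval ii jj h1 h3)]
      ring
    rw [hv]
    have hsum : ((List.range m).map (fun j =>
        ((List.range n).map (fun i => if rm.testBit i == cm.testBit j
          then (v.getD i []).getD j 0 else (h.getD i []).getD j 0)).sum)).sum
        = ∑ j ∈ Finset.range m, pvColv v h rm n j (cm.testBit j) := by
      rw [pv_sum_range_map]
      apply Finset.sum_congr rfl
      intro j _
      unfold pvColv pvCell
      rw [pv_sum_range_map]
    rw [hsum, pv_pop_bits m cm hcm]
    rw [Finset.sum_sub_distrib]
    have hite : ∀ j ∈ Finset.range m, (if cm.testBit j then k else 0)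
        = k * (if cm.testBit j then (1 : Int) else 0) := by
      intro j _; by_cases hb : cm.testBit j <;> simp [hb]
    rw [Finset.sum_congr rfl hite, ← Finset.mul_sum]
    ring

-- B's port computes pvCanon
lemma pv_B_eq (v h : List (List Int)) (k : Int) :
    solution_alt v h k = pvCanon v h k v.length (v.headD []).length := by
  unfold solution_alt pvCanon
  dsimp only
  set n := v.length with hn
  set m := (v.headD []).length with hm
  apply PySem.List.foldl_congr_mem
  intro ans rm hrm
  congr 1
  have hcc : ∀ j : Nat, ((List.range n).foldl (fun (p : Int × Int) i =>
        if rm.testBit i then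
          (p.1 + (h.getD i []).getD j 0, p.2 + (v.getD i []).getD j 0)
        else
          (p.1 + (v.getD i []).getD j 0, p.2 + (h.getD i []).getD j 0)) (0, 0))
      = (pvColv v h rm n j false, pvColv v h rm n j true) := by
    intro j
    rw [PySem.List.foldl_congr_mem (g := fun (p : Int × Int) i =>
      ((fun (a : Int) i => a + pvCell v h i j (rm.testBit i) false) p.1 i,
       (fun (a : Int) i => a + pvCell v h i j (rm.testBit i) true) p.2 i))]
    · rw [PySem.List.foldl_prod_mk (f := fun (a : Int) i => a + pvCell v h i j (rm.testBit i) false)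
        (g := fun (a : Int) i => a + pvCell v h i j (rm.testBit i) true)]
      unfold pvColv
      rw [pv_foldl_add_shift, pv_foldl_add_shift, pv_sum_range_map, pv_sum_range_map]
      simp
    · intro p i _
      unfold pvCell
      by_cases hb : rm.testBit i = true <;> simp [hb]
  have hcongr : ((List.range m).foldl (fun (total : Int) j =>
      total + max (((List.range n).foldl (fun (p : Int × Int) i =>
        if rm.testBit i then
          (p.1 + (h.getD i []).getD j 0, p.2 + (v.getD i []).getD j 0)
        else
          (p.1 + (v.getD i []).getD j 0, p.2 + (h.getD i []).getD j 0)) (0, 0)).1)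
        ((((List.range n).foldl (fun (p : Int × Int) i =>
        if rm.testBit i then
          (p.1 + (h.getD i []).getD j 0, p.2 + (v.getD i []).getD j 0)
        else
          (p.1 + (v.getD i []).getD j 0, p.2 + (h.getD i []).getD j 0)) (0, 0)).2) - k)) 0)
      = (List.range m).foldl (fun (total : Int) j =>
          total + max (pvColv v h rm n j false) (pvColv v h rm n j true - k)) 0 := by
    apply PySem.List.foldl_congr_mem
    intro a j _
    rw [hcc j]
  rw [hcongr, pv_foldl_add_shift, pv_sum_range_map]
  unfold pvS
  ring

-- ===== VERDICT (by name: the statement is the Claim_ definition above) =====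
theorem solution_spec : Claim_equal_solution := by
  intro v h k _ _
  unfold Spec_solution
  rw [pv_A_eq, pv_B_eq]
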